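-- pv_equiv track=rewrite | github.com/eliwaksbaum/webscore-player | mxlparse.py | setStarts
-- ===== SOURCE A (Python) =====
-- def setStarts(measures, map, start):
--     part = []
--     cur_time = start
--
--     for i in map:
--         for me in measures[i]:
--             jsme = {"start": cur_time, "index": me["index"], "class": me["class"]}
--             cur_time += me["duration"]
--             part.append(jsme)
--
--     return (part, cur_time)
-- ===== SOURCE B (Python) =====
-- def setStarts(measures, map, start):
--     flat = [me for i in map for me in measures[i]]
--     sums = [start]
--     for me in flat:
--         sums.append(sums[-1] + me["duration"])
--     part = [{"start": s, "index": me["index"], "class": me["class"]}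
--             for s, me in zip(sums, flat)]
--     return (part, sums[-1])
-- ===== Notes on version B (the rewrite author's own statement) =====
-- stated objective: alternative
-- what changed: Replaces A's single interleaved nested-loop accumulation with three separate passes: flatten the mapped measures, build an exclusive prefix-sum table of start times, then zip the table with the flat list to build the output dicts.
import Mathlib
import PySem

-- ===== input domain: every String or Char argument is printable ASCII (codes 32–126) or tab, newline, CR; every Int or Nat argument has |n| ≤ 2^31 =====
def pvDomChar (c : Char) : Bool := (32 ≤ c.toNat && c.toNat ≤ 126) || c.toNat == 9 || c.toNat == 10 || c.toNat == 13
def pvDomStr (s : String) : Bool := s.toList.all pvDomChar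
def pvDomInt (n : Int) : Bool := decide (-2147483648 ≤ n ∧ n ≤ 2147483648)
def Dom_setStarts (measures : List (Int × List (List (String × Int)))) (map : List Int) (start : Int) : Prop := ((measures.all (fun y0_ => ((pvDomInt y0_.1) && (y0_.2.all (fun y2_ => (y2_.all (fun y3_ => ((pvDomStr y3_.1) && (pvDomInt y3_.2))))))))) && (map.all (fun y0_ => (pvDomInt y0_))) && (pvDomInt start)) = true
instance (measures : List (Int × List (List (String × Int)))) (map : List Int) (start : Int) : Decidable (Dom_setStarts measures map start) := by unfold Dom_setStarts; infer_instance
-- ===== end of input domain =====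

-- B replaces A's interleaved nested-loop accumulation by three passes (flatten, exclusive prefix-sum table, zip); alternative decomposition, same cost.


-- dict lookup me[k] (first match in insertion order); total form, Pre_ guarantees the key is present
def dGet (me : List (String × Int)) (k : String) : Int := (List.lookup k me).getD 0

-- ===== PORT A =====
def setStarts (measures : List (Int × List (List (String × Int)))) (map : List Int) (start : Int) : (List (List (String × Int))) × Int :=
  map.foldl (fun acc i =>
    ((List.lookup i measures).getD []).foldl
      (fun (st : List (List (String × Int)) × Int) me =>
        let jsme : List (String × Int) :=
          [("start", st.2), ("index", dGet me "index"), ("class", dGet me "class")]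
        (st.1 ++ [jsme], st.2 + dGet me "duration"))
      acc)
    ([], start)

-- ===== PORT B =====
def setStarts_alt (measures : List (Int × List (List (String × Int)))) (map : List Int) (start : Int) : (List (List (String × Int))) × Int :=
  let flat := map.flatMap (fun i => (List.lookup i measures).getD [])
  let sums := flat.foldl
    (fun (s : List Int) me => s ++ [PySem.List.pyGetD s (-1) 0 + dGet me "duration"]) [start]
  let part := (sums.zip flat).map (fun p =>
    [("start", p.1), ("index", dGet p.2 "index"), ("class", dGet p.2 "class")])
  (part, PySem.List.pyGetD sums (-1) 0)

-- ===== PRECONDITION & SPEC =====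
-- Pre_ excludes exactly the inputs where Python A raises KeyError: a map entry absent from
-- measures, or a measure dict missing "index"/"class"/"duration".
def Pre_setStarts (measures : List (Int × List (List (String × Int)))) (map : List Int) (start : Int) : Prop :=
  (map.all (fun i =>
    (List.lookup i measures).isSome &&
    ((List.lookup i measures).getD []).all (fun me =>
      (List.lookup "index" me).isSome && (List.lookup "class" me).isSome &&
      (List.lookup "duration" me).isSome))) = true
instance (measures : List (Int × List (List (String × Int)))) (map : List Int) (start : Int) : Decidable (Pre_setStarts measures map start) := by unfold Pre_setStarts; infer_instance

def pvWitness_setStarts : (List (Int × List (List (String × Int)))) × List Int × Int :=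
  ([(0, [[("index", 1), ("class", 2), ("duration", 3)]])], [0], 5)

def Spec_setStarts (measures : List (Int × List (List (String × Int)))) (map : List Int) (start : Int) (out : (List (List (String × Int))) × Int) : Prop := out = setStarts_alt measures map start
instance (measures : List (Int × List (List (String × Int)))) (map : List Int) (start : Int) (out : (List (List (String × Int))) × Int) : Decidable (Spec_setStarts measures map start out) := by unfold Spec_setStarts; infer_instance

-- ===== CLAIM (what is proved, stated in full; the proofs are below) =====
def Claim_equal_setStarts : Prop := ∀ (measures : List (Int × List (List (String × Int)))) (map : List Int) (start : Int), Dom_setStarts measures map start → Pre_setStarts measures map start → Spec_setStarts measures map start (setStarts measures map start)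

-- ===== LEMMAS AND PROOFS =====

-- reference recursion: A's inner body over an already-flattened list
def goSpec : List (List (String × Int)) → Int → (List (List (String × Int)) × Int)
  | [], t => ([], t)
  | me :: rest, t =>
    let r := goSpec rest (t + dGet me "duration")
    ([("start", t), ("index", dGet me "index"), ("class", dGet me "class")] :: r.1, r.2)

-- exclusive prefix sums of durations, without the leading start
def tails : Int → List Int → List Int
  | _, [] => []
  | t, d :: ds => (t + d) :: tails (t + d) ds

theorem pyLast_singleton (t : Int) : PySem.List.pyGetD [t] (-1) 0 = t := by
  simp [PySem.List.pyGetD, PySem.List.pyGet?, PySem.List.pyIdx?]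

theorem pyLast_cons (a b : Int) (l : List Int) :
    PySem.List.pyGetD (a :: b :: l) (-1) 0 = PySem.List.pyGetD (b :: l) (-1) 0 := by
  simp only [PySem.List.pyGetD, PySem.List.pyGet?, PySem.List.pyIdx?]
  norm_num [List.getElem?_cons]

theorem foldl_nested_eq_flatMap {α β σ : Type} (l : List α) (g : α → List β)
    (f : σ → β → σ) (init : σ) :
    l.foldl (fun acc i => (g i).foldl f acc) init = (l.flatMap g).foldl f init := by
  induction l generalizing init with
  | nil => rfl
  | cons x xs ih => simp [List.foldl_append, ih]

theorem foldl_step_eq_goSpec (flat : List (List (String × Int)))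
    (acc : List (List (String × Int))) (t : Int) :
    flat.foldl (fun (st : List (List (String × Int)) × Int) me =>
        (st.1 ++ [[("start", st.2), ("index", dGet me "index"), ("class", dGet me "class")]],
         st.2 + dGet me "duration")) (acc, t)
      = (acc ++ (goSpec flat t).1, (goSpec flat t).2) := by
  induction flat generalizing acc t with
  | nil => simp [goSpec]
  | cons me rest ih => simp [goSpec, ih]

theorem sums_foldl_eq_tails (flat : List (List (String × Int))) (pre : List Int) (t : Int)
    (h : PySem.List.pyGetD pre (-1) 0 = t) (hne : pre ≠ []) :
    flat.foldl (fun (s : List Int) me =>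
        s ++ [PySem.List.pyGetD s (-1) 0 + dGet me "duration"]) pre
      = pre ++ tails t (flat.map (fun me => dGet me "duration")) := by
  induction flat generalizing pre t with
  | nil => simp [tails]
  | cons me rest ih =>
    simp only [List.foldl_cons, List.map_cons, tails, h]
    rw [ih (pre ++ [t + dGet me "duration"]) (t + dGet me "duration")
        (by simp [PySem.List.pyGetD_neg_one_append_singleton]) (by simp)]
    simp

theorem zip_tails_eq_goSpec (flat : List (List (String × Int))) (t : Int) :
    ((t :: tails t (flat.map (fun me => dGet me "duration"))).zip flat).map (fun p =>
        [("start", p.1), ("index", dGet p.2 "index"), ("class", dGet p.2 "class")])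
      = (goSpec flat t).1
    ∧ PySem.List.pyGetD (t :: tails t (flat.map (fun me => dGet me "duration"))) (-1) 0
      = (goSpec flat t).2 := by
  induction flat generalizing t with
  | nil => simp [tails, goSpec, pyLast_singleton]
  | cons me rest ih =>
    obtain ⟨h1, h2⟩ := ih (t + dGet me "duration")
    refine ⟨?_, ?_⟩
    · simp only [List.map_cons, tails, List.zip_cons_cons, List.map_cons, goSpec, h1]
    · simpa [tails, goSpec, pyLast_cons] using h2

-- ===== VERDICT (by name: the statement is the Claim_ definition above) =====
theorem setStarts_spec : Claim_equal_setStarts := by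
  intro measures map start _ _
  unfold Spec_setStarts setStarts
  simp only [setStarts_alt]
  rw [foldl_nested_eq_flatMap]
  set flat := map.flatMap (fun i => (List.lookup i measures).getD []) with hflat
  rw [foldl_step_eq_goSpec flat [] start]
  rw [sums_foldl_eq_tails flat [start] start (pyLast_singleton start) (by simp)]
  obtain ⟨h1, h2⟩ := zip_tails_eq_goSpec flat start
  simp only [List.nil_append, List.singleton_append] at *
  rw [h1, h2]
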